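-- pv_equiv track=rewrite | github.com/Moradell/advent-of-code | 2025/day_3/part_one.py | get_max_pair
-- ===== SOURCE A (Python) =====
-- def get_max_pair(s: str) -> int:
--     for tens in range(9, 0, -1):
--         for units in range(9, 0, -1):
--             candidate = tens * 10 + units
--
--             tens_str = str(tens)
--             units_str = str(units)
--
--             tens_pos = s.find(tens_str)
--
--             if tens_pos == -1:
--                 continue
--
--             units_pos = s.find(units_str, tens_pos + 1)
--             if units_pos != -1:
--                 return candidate
--     return 0
-- ===== SOURCE B (Python) =====
-- def get_max_pair(s: str) -> int:
--     best_tens = 0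
--     answer = 0
--     for c in s:
--         if '1' <= c <= '9':
--             d = ord(c) - 48
--             if best_tens > 0:
--                 answer = max(answer, best_tens * 10 + d)
--             best_tens = max(best_tens, d)
--     return answer
-- ===== Notes on version B (the rewrite author's own statement) =====
-- stated objective: simpler
-- what changed: Replaced the 81-candidate descending search (each candidate doing two substring scans with str.find) by a single left-to-right pass that keeps the largest tens digit seen so far and the best pair value.
import Mathlib
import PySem

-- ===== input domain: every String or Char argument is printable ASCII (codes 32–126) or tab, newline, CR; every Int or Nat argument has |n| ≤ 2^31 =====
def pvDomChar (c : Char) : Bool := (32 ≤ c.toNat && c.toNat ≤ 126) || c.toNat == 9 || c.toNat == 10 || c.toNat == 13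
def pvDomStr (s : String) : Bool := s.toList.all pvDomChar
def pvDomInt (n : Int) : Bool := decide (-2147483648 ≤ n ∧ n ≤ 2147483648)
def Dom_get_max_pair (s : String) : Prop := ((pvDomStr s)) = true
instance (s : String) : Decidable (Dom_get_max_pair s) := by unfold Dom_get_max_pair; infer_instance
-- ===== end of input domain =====

-- B replaces A's 81-candidate descending search (two str.find scans per candidate) by one
-- left-to-right pass keeping the largest tens digit seen so far and the best pair value (objective: simpler).

-- ===== PORT A =====
def get_max_pair (s : String) : Int :=
  match (PySem.List.pyRange 9 0 (-1)).foldl (fun acc tens =>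
    match acc with
    | some r => some r
    | none =>
      (PySem.List.pyRange 9 0 (-1)).foldl (fun acc2 units =>
        match acc2 with
        | some r => some r
        | none =>
          let candidate := tens * 10 + units
          let tens_str := PySem.Int.toStr tens
          let units_str := PySem.Int.toStr units
          let tens_pos := PySem.Str.find s tens_str
          if tens_pos = -1 then none
          else
            let units_pos := PySem.Str.findFrom s units_str (tens_pos + 1) none
            if units_pos ≠ -1 then some candidate else none) none) none
  with
  | some r => r
  | none => 0

-- ===== PORT B =====
-- the loop body of Source B as a named step function
def pvStepB (st : Int × Int) (c : Char) : Int × Int :=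
  if '1' ≤ c ∧ c ≤ '9' then
    let d : Int := (c.toNat : Int) - 48
    (max st.1 d, if st.1 > 0 then max st.2 (st.1 * 10 + d) else st.2)
  else st

def get_max_pair_alt (s : String) : Int :=
  (s.toList.foldl pvStepB (0, 0)).2

-- ===== PRECONDITION & SPEC =====
def Spec_get_max_pair (s : String) (out : Int) : Prop := out = get_max_pair_alt s
instance (s : String) (out : Int) : Decidable (Spec_get_max_pair s out) := by unfold Spec_get_max_pair; infer_instance

-- ===== CLAIM (what is proved, stated in full; the proofs are below) =====
def Claim_equal_get_max_pair : Prop := ∀ (s : String), Dom_get_max_pair s → Spec_get_max_pair s (get_max_pair s)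

-- ===== LEMMAS AND PROOFS =====

-- digit characters, their values, and ordered pairs of occurrences
abbrev pvIsD (c : Char) : Prop := '1' ≤ c ∧ c ≤ '9'
def pvDg (c : Char) : Int := (c.toNat : Int) - 48
def pvChr (t : Int) : Char := Char.ofNat (48 + t.toNat)
def pvPair (l : List Char) (a b : Char) : Prop := ∃ l1 l2 l3, l = l1 ++ a :: l2 ++ b :: l3

-- "v is the maximum value of an ordered digit pair of l (0 if none)"
def pvGreat (l : List Char) (v : Int) : Prop :=
  (v = 0 ∨ ∃ a c, pvIsD a ∧ pvIsD c ∧ pvPair l a c ∧ v = pvDg a * 10 + pvDg c)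
  ∧ (∀ a c, pvIsD a → pvIsD c → pvPair l a c → pvDg a * 10 + pvDg c ≤ v)

lemma pvIsD_bounds {c : Char} (h : pvIsD c) : 1 ≤ pvDg c ∧ pvDg c ≤ 9 := by
  
  obtain ⟨h1, h2⟩ := h
  have a1 : 49 ≤ c.toNat := h1
  have a2 : c.toNat ≤ 57 := h2
  unfold pvDg; omega

lemma pvChr_pvDg {c : Char} (h : pvIsD c) : pvChr (pvDg c) = c := by
  
  obtain ⟨h1, h2⟩ := h
  have a1 : 49 ≤ c.toNat := h1
  have a2 : c.toNat ≤ 57 := h2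
  have hh : (48 + (pvDg c).toNat) = c.toNat := by unfold pvDg; omega
  rw [pvChr, hh]
  exact Char.ofNat_toNat c

lemma pvGreat_unique {l : List Char} {v w : Int} (hv : pvGreat l v) (hw : pvGreat l w) : v = w := by
  
  obtain ⟨hv1, hv2⟩ := hv
  obtain ⟨hw1, hw2⟩ := hw
  rcases hv1 with rfl | ⟨a, c, ha, hc, hp, rfl⟩
  · rcases hw1 with rfl | ⟨a, c, ha, hc, hp, rfl⟩
    · rfl
    · have h1 := hv2 a c ha hc hp
      have b1 := pvIsD_bounds ha
      have b2 := pvIsD_bounds hc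
      omega
  · rcases hw1 with rfl | ⟨a', c', ha', hc', hp', rfl⟩
    · have h1 := hw2 a c ha hc hp
      have b1 := pvIsD_bounds ha
      have b2 := pvIsD_bounds hc
      omega
    · exact le_antisymm (hw2 a c ha hc hp) (hv2 a' c' ha' hc' hp')

lemma pvPair_nil (a b : Char) : ¬ pvPair [] a b := by
  
  rintro ⟨l1, l2, l3, h⟩
  cases l1 <;> simp_all

lemma pvPair_cons {x a b : Char} {l : List Char} :
    pvPair (x :: l) a b ↔ (x = a ∧ b ∈ l) ∨ pvPair l a b := by
  
  constructor
  · rintro ⟨l1, l2, l3, h⟩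
    cases l1 with
    | nil =>
      rw [List.nil_append] at h
      injection h with hx hl
      exact Or.inl ⟨hx, by rw [hl]; simp⟩
    | cons y l1' =>
      rw [List.cons_append] at h
      injection h with hx hl
      exact Or.inr ⟨l1', l2, l3, hl⟩
  · rintro (⟨rfl, hb⟩ | ⟨l1, l2, l3, rfl⟩)
    · obtain ⟨u, v, rfl⟩ := List.mem_iff_append.mp hb
      exact ⟨[], u, v, rfl⟩
    · exact ⟨x :: l1, l2, l3, rfl⟩

-- ---------- B side ----------
def pvBest : List Char → Int
  | [] => 0
  | c :: l => if pvIsD c then max (pvDg c) (pvBest l) else pvBest l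

def pvMpb (b : Int) : List Char → Int
  | [] => 0
  | c :: l =>
    if pvIsD c then
      (if 0 < b then max (b * 10 + pvDg c) (pvMpb (max b (pvDg c)) l) else pvMpb (max b (pvDg c)) l)
    else pvMpb b l

lemma pvFoldB (l : List Char) : ∀ b a : Int, 0 ≤ b → 0 ≤ a →
    l.foldl pvStepB (b, a) = (max b (pvBest l), max a (pvMpb b l)) := by
  induction l with
  | nil => intro b a hb ha; simp [pvBest, pvMpb, max_eq_left hb, max_eq_left ha]
  | cons c l ih =>
    intro b a hb ha
    by_cases hd : pvIsD c
    · have hdg : ((c.toNat : Int) - 48) = pvDg c := rfl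
      by_cases hb0 : 0 < b
      · simp only [List.foldl_cons, pvStepB, if_pos hd, if_pos hb0, hdg,
          pvBest, pvMpb]
        rw [ih _ _ (le_max_of_le_left hb) (le_trans ha (le_max_left _ _))]
        rw [Prod.mk.injEq]
        exact ⟨(max_assoc _ _ _), (max_assoc _ _ _)⟩
      · simp only [List.foldl_cons, pvStepB, if_pos hd, if_neg hb0, hdg,
          pvBest, pvMpb]
        rw [ih _ _ (le_max_of_le_left hb) ha]
        rw [Prod.mk.injEq]
        exact ⟨(max_assoc _ _ _), rfl⟩
    · simp only [List.foldl_cons, pvStepB, if_neg hd, pvBest, pvMpb]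
      exact ih _ _ hb ha

lemma pvMpb_nonneg (l : List Char) : ∀ b : Int, 0 ≤ pvMpb b l := by
  induction l with
  | nil => intro b; simp [pvMpb]
  | cons c l ih =>
    intro b
    by_cases hd : pvIsD c
    · by_cases hb0 : 0 < b
      · simp only [pvMpb, if_pos hd, if_pos hb0]
        exact le_max_of_le_right (ih _)
      · simp only [pvMpb, if_pos hd, if_neg hb0]
        exact ih _
    · simp only [pvMpb, if_neg hd]
      exact ih _

lemma pvMpb_spec (l : List Char) : ∀ b : Int, 0 ≤ b →
    ((pvMpb b l = 0 ∨
      (∃ a c, pvIsD a ∧ pvIsD c ∧ pvPair l a c ∧ pvMpb b l = pvDg a * 10 + pvDg c) ∨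
      (0 < b ∧ ∃ c, pvIsD c ∧ c ∈ l ∧ pvMpb b l = b * 10 + pvDg c))
    ∧ (∀ a c, pvIsD a → pvIsD c → pvPair l a c → pvDg a * 10 + pvDg c ≤ pvMpb b l)
    ∧ (0 < b → ∀ c, pvIsD c → c ∈ l → b * 10 + pvDg c ≤ pvMpb b l)) := by
  induction l with
  | nil =>
    intro b hb
    refine ⟨Or.inl rfl, ?_, ?_⟩
    · intro a c _ _ hp; exact absurd hp (pvPair_nil a c)
    · intro _ c _ hc; simp at hc
  | cons c l ih =>
    intro b hb
    by_cases hd : pvIsD c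
    · have hdb := pvIsD_bounds hd
      have hb' : (0:Int) ≤ max b (pvDg c) := le_max_of_le_left hb
      have hb'pos : (0:Int) < max b (pvDg c) := lt_of_lt_of_le (by omega) (le_max_right _ _)
      obtain ⟨ach, bndP, bndF⟩ := ih (max b (pvDg c)) hb'
      by_cases hb0 : 0 < b
      · have hM : pvMpb b (c :: l) = max (b * 10 + pvDg c) (pvMpb (max b (pvDg c)) l) := by
          simp [pvMpb, hd, hb0]
        refine ⟨?_, ?_, ?_⟩
        · rcases max_choice (b * 10 + pvDg c) (pvMpb (max b (pvDg c)) l) with hm | hm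
          · exact Or.inr (Or.inr ⟨hb0, c, hd, List.mem_cons_self, by rw [hM, hm]⟩)
          · rcases ach with h0 | ⟨a, c', ha, hc', hp, he⟩ | ⟨_, u, hu, hul, he⟩
            · exact Or.inr (Or.inr ⟨hb0, c, hd, List.mem_cons_self, by
                rw [hM, hm, h0]; rw [h0] at hm; omega⟩)
            · exact Or.inr (Or.inl ⟨a, c', ha, hc', pvPair_cons.mpr (Or.inr hp), by rw [hM, hm, he]⟩)
            · rcases max_choice b (pvDg c) with hbd | hbd
              · exact Or.inr (Or.inr ⟨hb0, u, hu, List.mem_cons_of_mem _ hul, by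
                  rw [hM, hm, he, hbd]⟩)
              · exact Or.inr (Or.inl ⟨c, u, hd, hu, pvPair_cons.mpr (Or.inl ⟨rfl, hul⟩), by
                  rw [hM, hm, he, hbd]⟩)
        · intro a c' ha hc' hp
          rcases pvPair_cons.mp hp with ⟨hca, hmem⟩ | hp'
          · have h1 : pvDg a * 10 + pvDg c' ≤ max b (pvDg c) * 10 + pvDg c' := by
              have : pvDg a ≤ max b (pvDg c) := hca ▸ le_max_right _ _
              omega
            have h2 := bndF hb'pos c' hc' hmem
            rw [hM]; exact le_trans (le_trans h1 h2) (le_max_right _ _)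
          · rw [hM]; exact le_trans (bndP a c' ha hc' hp') (le_max_right _ _)
        · intro _ u hu hmem
          rcases List.mem_cons.mp hmem with rfl | hul
          · rw [hM]; exact le_max_left _ _
          · have h1 : b * 10 + pvDg u ≤ max b (pvDg c) * 10 + pvDg u := by
              have := le_max_left b (pvDg c); omega
            rw [hM]; exact le_trans (le_trans h1 (bndF hb'pos u hu hul)) (le_max_right _ _)
      · have hbz : b = 0 := by omega
        have hbd : max b (pvDg c) = pvDg c := max_eq_right (by omega)
        have hM : pvMpb b (c :: l) = pvMpb (max b (pvDg c)) l := by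
          simp [pvMpb, hd, hb0]
        refine ⟨?_, ?_, ?_⟩
        · rcases ach with h0 | ⟨a, c', ha, hc', hp, he⟩ | ⟨_, u, hu, hul, he⟩
          · exact Or.inl (by rw [hM, h0])
          · exact Or.inr (Or.inl ⟨a, c', ha, hc', pvPair_cons.mpr (Or.inr hp), by rw [hM, he]⟩)
          · exact Or.inr (Or.inl ⟨c, u, hd, hu, pvPair_cons.mpr (Or.inl ⟨rfl, hul⟩), by
              rw [hM, he, hbd]⟩)
        · intro a c' ha hc' hp
          rcases pvPair_cons.mp hp with ⟨hca, hmem⟩ | hp'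
          · have h1 : pvDg a * 10 + pvDg c' ≤ max b (pvDg c) * 10 + pvDg c' := by
              have : pvDg a ≤ max b (pvDg c) := hca ▸ le_max_right _ _
              omega
            rw [hM]; exact le_trans h1 (bndF hb'pos c' hc' hmem)
          · rw [hM]; exact bndP a c' ha hc' hp'
        · intro h0 _ _ _; omega
    · have hM : pvMpb b (c :: l) = pvMpb b l := by simp [pvMpb, hd]
      obtain ⟨ach, bndP, bndF⟩ := ih b hb
      refine ⟨?_, ?_, ?_⟩
      · rcases ach with h0 | ⟨a, c', ha, hc', hp, he⟩ | ⟨hbp, u, hu, hul, he⟩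
        · exact Or.inl (hM ▸ h0)
        · exact Or.inr (Or.inl ⟨a, c', ha, hc', pvPair_cons.mpr (Or.inr hp), hM ▸ he⟩)
        · exact Or.inr (Or.inr ⟨hbp, u, hu, List.mem_cons_of_mem _ hul, hM ▸ he⟩)
      · intro a c' ha hc' hp
        rcases pvPair_cons.mp hp with ⟨hca, _⟩ | hp'
        · exact absurd (hca ▸ ha) hd
        · rw [hM]; exact bndP a c' ha hc' hp'
      · intro hbp u hu hmem
        rcases List.mem_cons.mp hmem with rfl | hul
        · exact absurd hu hd
        · rw [hM]; exact bndF hbp u hu hul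

lemma pvAlt_great (s : String) : pvGreat s.toList (get_max_pair_alt s) := by
  have halt : get_max_pair_alt s = pvMpb 0 s.toList := by
    unfold get_max_pair_alt
    rw [pvFoldB s.toList 0 0 le_rfl le_rfl]
    exact max_eq_right (pvMpb_nonneg s.toList 0)
  obtain ⟨ach, bndP, _⟩ := pvMpb_spec s.toList 0 le_rfl
  rw [halt]
  refine ⟨?_, bndP⟩
  rcases ach with h0 | hpair | ⟨h, _⟩
  · exact Or.inl h0
  · exact Or.inr hpair
  · omega

-- ---------- A side ----------
def pvCond (l : List Char) (t u : Int) : Bool :=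
  if PySem.Chars.find l (PySem.Int.toChars t) = -1 then false
  else decide (PySem.Chars.findFrom l (PySem.Int.toChars u) (PySem.Chars.find l (PySem.Int.toChars t) + 1) none ≠ -1)

def pvFirst (L : List (Int × Int)) (f : Int → Int → Bool) : Int :=
  match L with
  | [] => 0
  | (t, u) :: L => if f t u then t * 10 + u else pvFirst L f

def pvL81 : List (Int × Int) :=
  (PySem.List.pyRange 9 0 (-1)).flatMap fun t => (PySem.List.pyRange 9 0 (-1)).map fun u => (t, u)

lemma pvFoldOpt_some {α : Type} (xs : List α) (g : α → Option Int) (r : Int) :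
    xs.foldl (fun acc x => match acc with | some v => some v | none => g x) (some r) = some r := by
  
  induction xs with
  | nil => rfl
  | cons x xs ih => simpa using ih

lemma pvFoldOpt_none {α : Type} (xs : List α) (g : α → Option Int) :
    xs.foldl (fun acc x => match acc with | some v => some v | none => g x) none = xs.findSome? g := by
  
  induction xs with
  | nil => rfl
  | cons x xs ih =>
    rw [List.foldl_cons, List.findSome?_cons]
    cases hgx : g x with
    | some r => simp [pvFoldOpt_some]
    | none => simpa using ih

lemma pvFindSome_flatMap {α β γ : Type} (l : List α) (g : α → List β) (f : β → Option γ) :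
    (l.flatMap g).findSome? f = l.findSome? fun x => (g x).findSome? f := by
  
  induction l with
  | nil => rfl
  | cons x l ih =>
    rw [List.flatMap_cons, List.findSome?_append, ih, List.findSome?_cons]
    cases List.findSome? f (g x) <;> rfl

lemma pvFindSome_first (L : List (Int × Int)) (f : Int → Int → Bool) :
    (L.findSome? fun p => if f p.1 p.2 then some (p.1 * 10 + p.2) else none).getD 0 = pvFirst L f := by
  
  induction L with
  | nil => rfl
  | cons p L ih =>
    obtain ⟨t, u⟩ := p
    rw [List.findSome?_cons]
    by_cases hf : f t u = true
    · simp [pvFirst, hf]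
    · simp only [Bool.not_eq_true] at hf
      simp [pvFirst, hf, ih]

lemma pvBody (s : String) (t u : Int) :
    (let candidate := t * 10 + u
     let tens_str := PySem.Int.toStr t
     let units_str := PySem.Int.toStr u
     let tens_pos := PySem.Str.find s tens_str
     if tens_pos = -1 then (none : Option Int)
     else
       let units_pos := PySem.Str.findFrom s units_str (tens_pos + 1) none
       if units_pos ≠ -1 then some candidate else none)
    = if pvCond s.toList t u then some (t * 10 + u) else none := by
  simp only [pvCond, PySem.Str.find_eq, PySem.Str.findFrom_eq, PySem.Int.toList_toStr]
  split_ifs <;> simp_all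

lemma pvA_eq_first (s : String) : get_max_pair s = pvFirst pvL81 (pvCond s.toList) := by
  unfold get_max_pair
  rw [pvFoldOpt_none]
  simp only [pvFoldOpt_none]
  simp only [pvBody]
  have hm : ∀ o : Option Int, (match o with | some r => r | none => 0) = o.getD 0 := by
    intro o; cases o <;> rfl
  rw [hm, ← pvFindSome_first, pvL81, pvFindSome_flatMap]
  simp only [List.findSome?_map, Function.comp_def]

lemma pvFirst_spec (L : List (Int × Int)) (f : Int → Int → Bool) (P : Int → Int → Prop)
    (hf : ∀ p ∈ L, (f p.1 p.2 = true ↔ P p.1 p.2))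
    (hsort : L.Pairwise (fun p q => q.1 * 10 + q.2 < p.1 * 10 + p.2))
    (hpos : ∀ p ∈ L, 0 < p.1 * 10 + p.2) :
    (pvFirst L f = 0 ∨ ∃ p ∈ L, P p.1 p.2 ∧ pvFirst L f = p.1 * 10 + p.2)
    ∧ (∀ p ∈ L, P p.1 p.2 → p.1 * 10 + p.2 ≤ pvFirst L f) := by
  
  induction L with
  | nil => exact ⟨Or.inl rfl, by simp⟩
  | cons p L ih =>
    obtain ⟨t, u⟩ := p
    rw [List.pairwise_cons] at hsort
    obtain ⟨hlt, hs'⟩ := hsort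
    have hpos' : ∀ q ∈ L, 0 < q.1 * 10 + q.2 := fun q hq => hpos q (List.mem_cons_of_mem _ hq)
    have hf' : ∀ p ∈ L, (f p.1 p.2 = true ↔ P p.1 p.2) :=
      fun p hp => hf p (List.mem_cons_of_mem _ hp)
    obtain ⟨iach, ibnd⟩ := ih hf' hs' hpos'
    by_cases hft : f t u = true
    · refine ⟨Or.inr ⟨(t, u), List.mem_cons_self, (hf (t, u) List.mem_cons_self).mp hft, by simp [pvFirst, hft]⟩, ?_⟩
      intro q hq _
      rcases List.mem_cons.mp hq with rfl | hq'
      · simp [pvFirst, hft]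
      · simp only [pvFirst, hft, if_true]
        exact le_of_lt (hlt q hq')
    · simp only [Bool.not_eq_true] at hft
      have hstep : pvFirst ((t, u) :: L) f = pvFirst L f := by simp [pvFirst, hft]
      refine ⟨?_, ?_⟩
      · rcases iach with h0 | ⟨q, hq, hP, he⟩
        · exact Or.inl (hstep ▸ h0)
        · exact Or.inr ⟨q, List.mem_cons_of_mem _ hq, hP, hstep ▸ he⟩
      · intro q hq hP
        rcases List.mem_cons.mp hq with rfl | hq'
        · exact absurd ((hf (t, u) List.mem_cons_self).mpr hP) (by simp [hft])
        · exact hstep ▸ ibnd q hq' hP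

lemma pvDigit_toChars {t : Int} (h1 : 1 ≤ t) (h9 : t ≤ 9) : PySem.Int.toChars t = [pvChr t] := by
  
  interval_cases t <;> decide

lemma pvChr_isD {t : Int} (h1 : 1 ≤ t) (h9 : t ≤ 9) : pvIsD (pvChr t) ∧ pvDg (pvChr t) = t := by
  
  interval_cases t <;> exact ⟨by decide, by decide⟩

lemma pvMem_L81 {t u : Int} (h1 : 1 ≤ t) (h9 : t ≤ 9) (h1' : 1 ≤ u) (h9' : u ≤ 9) :
    (t, u) ∈ pvL81 := by
  
  interval_cases t <;> interval_cases u <;> decide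

lemma pvCond_chars_iff (l : List Char) (a b : Char) :
    (if PySem.Chars.find l [a] = -1 then false
     else decide (PySem.Chars.findFrom l [b] (PySem.Chars.find l [a] + 1) none ≠ -1)) = true
    ↔ pvPair l a b := by
  
  constructor
  · intro h
    by_cases hfind : PySem.Chars.find l [a] = -1
    · rw [if_pos hfind] at h; exact absurd h (by simp)
    · rw [if_neg hfind, decide_eq_true_eq] at h
      have hpos : 0 ≤ PySem.Chars.find l [a] := by
        have := PySem.Chars.neg_one_le_find l [a]; omega
      obtain ⟨hpre, hmin⟩ := PySem.Chars.find_spec hpos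
      obtain ⟨rest, hrest⟩ := hpre
      have hlen : (PySem.Chars.find l [a]).toNat < l.length := by
        have hne : List.drop (PySem.Chars.find l [a]).toNat l ≠ [] := by
          rw [← hrest]; simp
        rw [Ne, List.drop_eq_nil_iff] at hne; omega
      have hcast : PySem.Chars.find l [a] + 1 = (((PySem.Chars.find l [a]).toNat + 1 : Nat) : Int) := by
        omega
      rw [hcast] at h
      have hinf : [b] <:+: List.drop ((PySem.Chars.find l [a]).toNat + 1) l := by
        by_contra hc
        exact h ((PySem.Chars.findFrom_natCast_eq_neg_one_iff l [b] _ (by omega)).mpr hc)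
      have hdrop1 : List.drop ((PySem.Chars.find l [a]).toNat + 1) l = rest := by
        have h0 : List.drop ((PySem.Chars.find l [a]).toNat + 1) l
            = List.drop 1 (List.drop (PySem.Chars.find l [a]).toNat l) := by
          rw [List.drop_drop]
        rw [h0, ← hrest]
        rfl
      have hbmem : b ∈ rest := by
        rw [← hdrop1]
        exact (List.singleton_infix_iff b _).mp hinf
      obtain ⟨u, v, hbv⟩ := List.mem_iff_append.mp hbmem
      refine ⟨List.take (PySem.Chars.find l [a]).toNat l, u, v, ?_⟩
      conv_lhs => rw [← List.take_append_drop (PySem.Chars.find l [a]).toNat l]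
      rw [← hrest, hbv]
      simp
  · rintro ⟨l1, l2, l3, rfl⟩
    have hinfa : [a] <:+: (l1 ++ a :: l2 ++ b :: l3) := (List.singleton_infix_iff a _).mpr (by simp)
    have hfind : PySem.Chars.find (l1 ++ a :: l2 ++ b :: l3) [a] ≠ -1 :=
      (PySem.Chars.find_ne_neg_one_iff _ [a]).mpr hinfa
    rw [if_neg hfind, decide_eq_true_eq]
    have hpos : 0 ≤ PySem.Chars.find (l1 ++ a :: l2 ++ b :: l3) [a] := by
      have := PySem.Chars.neg_one_le_find (l1 ++ a :: l2 ++ b :: l3) [a]; omega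
    obtain ⟨hpre, hmin⟩ := PySem.Chars.find_spec hpos
    have hple : (PySem.Chars.find (l1 ++ a :: l2 ++ b :: l3) [a]).toNat ≤ l1.length := by
      by_contra hgt
      refine hmin l1.length (by omega) ?_
      have hdl : List.drop l1.length (l1 ++ a :: l2 ++ b :: l3) = a :: (l2 ++ b :: l3) := by simp
      rw [hdl]
      exact ⟨l2 ++ b :: l3, rfl⟩
    have hlen : (l1 ++ a :: l2 ++ b :: l3).length = l1.length + l2.length + l3.length + 2 := by
      simp; omega
    have hcast : PySem.Chars.find (l1 ++ a :: l2 ++ b :: l3) [a] + 1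
        = (((PySem.Chars.find (l1 ++ a :: l2 ++ b :: l3) [a]).toNat + 1 : Nat) : Int) := by
      omega
    rw [hcast, Ne,
      PySem.Chars.findFrom_natCast_eq_neg_one_iff _ [b] _ (by rw [hlen]; omega)]
    refine not_not_intro ((List.singleton_infix_iff b _).mpr ?_)
    generalize hg : (PySem.Chars.find (l1 ++ a :: l2 ++ b :: l3) [a]).toNat = n at hple ⊢
    have hsplit : l1 ++ a :: l2 ++ b :: l3 = (l1 ++ [a]) ++ (l2 ++ b :: l3) := by simp
    rw [hsplit, List.drop_append_of_le_length (by simp only [List.length_append, List.length_cons, List.length_nil]; omega)]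
    simp

lemma pvCond_iff (l : List Char) {t u : Int} (h1 : 1 ≤ t) (h9 : t ≤ 9) (h1' : 1 ≤ u) (h9' : u ≤ 9) :
    pvCond l t u = true ↔ pvPair l (pvChr t) (pvChr u) := by
  
  rw [pvCond, pvDigit_toChars h1 h9, pvDigit_toChars h1' h9']
  exact pvCond_chars_iff l (pvChr t) (pvChr u)

lemma pvA_great (s : String) : pvGreat s.toList (get_max_pair s) := by
  rw [pvA_eq_first]
  have hrange : ∀ p ∈ pvL81, 1 ≤ p.1 ∧ p.1 ≤ 9 ∧ 1 ≤ p.2 ∧ p.2 ≤ 9 := by decide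
  have hsort : pvL81.Pairwise (fun p q => q.1 * 10 + q.2 < p.1 * 10 + p.2) := by decide
  have hpos : ∀ p ∈ pvL81, 0 < p.1 * 10 + p.2 := by decide
  have hf : ∀ p ∈ pvL81, (pvCond s.toList p.1 p.2 = true ↔ pvPair s.toList (pvChr p.1) (pvChr p.2)) := by
    intro p hp
    obtain ⟨h1, h9, h1', h9'⟩ := hrange p hp
    exact pvCond_iff s.toList h1 h9 h1' h9'
  obtain ⟨ach, bnd⟩ := pvFirst_spec pvL81 (pvCond s.toList)
    (fun t u => pvPair s.toList (pvChr t) (pvChr u)) hf hsort hpos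
  constructor
  · rcases ach with h0 | ⟨p, hp, hP, he⟩
    · exact Or.inl h0
    · obtain ⟨h1, h9, h1', h9'⟩ := hrange p hp
      obtain ⟨hD1, hdg1⟩ := pvChr_isD h1 h9
      obtain ⟨hD2, hdg2⟩ := pvChr_isD h1' h9'
      exact Or.inr ⟨pvChr p.1, pvChr p.2, hD1, hD2, hP, by rw [he, hdg1, hdg2]⟩
  · intro a c ha hc hp
    obtain ⟨ha1, ha9⟩ := pvIsD_bounds ha
    obtain ⟨hc1, hc9⟩ := pvIsD_bounds hc
    have hmem := pvMem_L81 ha1 ha9 hc1 hc9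
    have := bnd (pvDg a, pvDg c) hmem (by
      simp only []
      rw [pvChr_pvDg ha, pvChr_pvDg hc]
      exact hp)
    simpa using this

-- ===== VERDICT (by name: the statement is the Claim_ definition above) =====
theorem get_max_pair_spec : Claim_equal_get_max_pair := by
  intro s _
  unfold Spec_get_max_pair
  exact pvGreat_unique (pvA_great s) (pvAlt_great s)
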